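-- pv_equiv track=rewrite | github.com/pypi-data/pypi-mirror-285 | packages/radinitio/radinitio-1.2.3-py3-none-any.whl/radinitio/__init__.py | get_duplicate_only_distrib
-- ===== SOURCE A (Python) =====
-- def get_duplicate_only_distrib(seq_clone_errors_freq, seq_clone_errors_vals):
--     dup_distrib = {}
--     # Iterate over the clone+error distribution and sum all frequencies for a given clone size
--     for i in range(len(seq_clone_errors_freq)):
--         clone_size = seq_clone_errors_vals[i][0]
--         dup_distrib.setdefault(clone_size, 0)
--         dup_distrib[clone_size] += seq_clone_errors_freq[i]
--     dup_distrib = [ dup_distrib[clone_size] for clone_size in sorted(dup_distrib) ]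
--     # Return a list containing the per-sequenced clone size frequencies
--     return dup_distrib
-- ===== SOURCE B (Python) =====
-- def get_duplicate_only_distrib(seq_clone_errors_freq, seq_clone_errors_vals):
--     # Pair each clone size with its frequency, sort stably by clone size,
--     # then group-scan the sorted list summing each run of equal sizes.
--     pairs = [(seq_clone_errors_vals[i][0], seq_clone_errors_freq[i])
--              for i in range(len(seq_clone_errors_freq))]
--     pairs.sort(key=lambda p: p[0])
--     out = []
--     cur = None
--     run = 0
--     for size, f in pairs:
--         if cur is None:
--             cur, run = size, f
--         elif size == cur:
--             run += f
--         else: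
--             out.append(run)
--             cur, run = size, f
--     if cur is not None:
--         out.append(run)
--     return out
-- ===== Notes on version B (the rewrite author's own statement) =====
-- stated objective: alternative
-- what changed: Replaces the dict of running sums plus a final key sort by a stable sort of (clone_size, freq) pairs followed by a single group-scan that emits one running sum per run of equal clone sizes.
import Mathlib
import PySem

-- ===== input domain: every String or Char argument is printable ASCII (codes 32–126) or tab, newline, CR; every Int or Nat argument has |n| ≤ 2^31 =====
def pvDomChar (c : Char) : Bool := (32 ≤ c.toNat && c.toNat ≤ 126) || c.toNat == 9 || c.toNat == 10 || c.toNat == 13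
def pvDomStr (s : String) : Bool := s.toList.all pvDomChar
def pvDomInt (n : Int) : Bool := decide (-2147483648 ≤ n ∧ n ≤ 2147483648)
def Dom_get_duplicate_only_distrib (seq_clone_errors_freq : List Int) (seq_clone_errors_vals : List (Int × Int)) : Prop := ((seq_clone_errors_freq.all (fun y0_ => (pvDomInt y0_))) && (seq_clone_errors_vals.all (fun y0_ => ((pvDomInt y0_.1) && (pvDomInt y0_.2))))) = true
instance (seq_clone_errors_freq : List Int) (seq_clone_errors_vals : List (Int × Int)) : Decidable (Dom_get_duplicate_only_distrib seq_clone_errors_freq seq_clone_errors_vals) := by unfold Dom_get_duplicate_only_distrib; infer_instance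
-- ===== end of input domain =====

-- B replaces A's dict of running sums (plus a final key sort) by a stable sort of
-- (clone_size, freq) pairs followed by one group-scan; same results, no speed claim.

-- ===== PORT A =====
def get_duplicate_only_distrib (seq_clone_errors_freq : List Int) (seq_clone_errors_vals : List (Int × Int)) : List Int :=
  let dup :=
    (PySem.List.pyRange 0 (seq_clone_errors_freq.length : Int)).foldl
      (fun (d : PySem.Dict Int Int) i =>
        let clone_size := (PySem.List.pyGetD seq_clone_errors_vals i (0, 0)).1
        let d := d.setdefault clone_size 0
        d.insert clone_size (d.getD clone_size 0 + PySem.List.pyGetD seq_clone_errors_freq i 0))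
      PySem.Dict.empty
  (PySem.List.sorted dup.keys (fun k => k)).map (fun k => dup.getD k 0)

-- ===== PORT B =====
-- B-side helper: the body of B's grouping loop (state: output so far, current clone size, running sum)
def pvScanStep (st : List Int × Option Int × Int) (p : Int × Int) : List Int × Option Int × Int :=
  match st.2.1 with
  | none => (st.1, some p.1, p.2)
  | some c => if p.1 = c then (st.1, some c, st.2.2 + p.2)
              else (st.1 ++ [st.2.2], some p.1, p.2)

-- B-side helper: the trailing 'if cur is not None: out.append(run)'
def pvFinish (st : List Int × Option Int × Int) : List Int :=
  match st.2.1 with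
  | none => st.1
  | some _ => st.1 ++ [st.2.2]

def get_duplicate_only_distrib_alt (seq_clone_errors_freq : List Int) (seq_clone_errors_vals : List (Int × Int)) : List Int :=
  let pairs := (PySem.List.pyRange 0 (seq_clone_errors_freq.length : Int)).map
      (fun i => ((PySem.List.pyGetD seq_clone_errors_vals i (0, 0)).1,
                 PySem.List.pyGetD seq_clone_errors_freq i 0))
  let sp := PySem.List.sorted pairs (fun p => p.1)
  pvFinish (sp.foldl pvScanStep ([], none, 0))

-- ===== PRECONDITION & SPEC =====
-- A indexes seq_clone_errors_vals[i] for every i < len(seq_clone_errors_freq): a shorter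
-- vals list raises IndexError (B raises there too); Pre_ excludes exactly those inputs.
def Pre_get_duplicate_only_distrib (seq_clone_errors_freq : List Int) (seq_clone_errors_vals : List (Int × Int)) : Prop :=
  seq_clone_errors_freq.length ≤ seq_clone_errors_vals.length
instance (seq_clone_errors_freq : List Int) (seq_clone_errors_vals : List (Int × Int)) : Decidable (Pre_get_duplicate_only_distrib seq_clone_errors_freq seq_clone_errors_vals) := by unfold Pre_get_duplicate_only_distrib; infer_instance

def pvWitness_get_duplicate_only_distrib : List Int × (List (Int × Int)) := ([1, 2, 1], [(2, 0), (3, 1), (2, 5)])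

def Spec_get_duplicate_only_distrib (seq_clone_errors_freq : List Int) (seq_clone_errors_vals : List (Int × Int)) (out : List Int) : Prop := out = get_duplicate_only_distrib_alt seq_clone_errors_freq seq_clone_errors_vals
instance (seq_clone_errors_freq : List Int) (seq_clone_errors_vals : List (Int × Int)) (out : List Int) : Decidable (Spec_get_duplicate_only_distrib seq_clone_errors_freq seq_clone_errors_vals out) := by unfold Spec_get_duplicate_only_distrib; infer_instance

-- ===== CLAIM (what is proved, stated in full; the proofs are below) =====
def Claim_equal_get_duplicate_only_distrib : Prop := ∀ (seq_clone_errors_freq : List Int) (seq_clone_errors_vals : List (Int × Int)), Dom_get_duplicate_only_distrib seq_clone_errors_freq seq_clone_errors_vals → Pre_get_duplicate_only_distrib seq_clone_errors_freq seq_clone_errors_vals → Spec_get_duplicate_only_distrib seq_clone_errors_freq seq_clone_errors_vals (get_duplicate_only_distrib seq_clone_errors_freq seq_clone_errors_vals)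

-- ===== LEMMAS AND PROOFS =====

-- the (clone_size, freq) pair list both programs conceptually traverse
def pvPairs (freq : List Int) (vals : List (Int × Int)) : List (Int × Int) :=
  (freq.zip vals).map (fun p => (p.2.1, p.1))

-- total frequency of clone size k in a pair list
def pvSumK (q : List (Int × Int)) (k : Int) : Int :=
  ((q.filter (fun p => p.1 == k)).map (·.2)).sum

-- per-clone-size sums in first-occurrence order of the clone sizes
def pvG (q : List (Int × Int)) : List Int :=
  (PySem.Set.ofList (q.map (·.1))).map (pvSumK q)

lemma pyRange_self (a : Int) : PySem.List.pyRange a a = [] := by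
  simp [PySem.List.pyRange]

lemma map_range_pairs (freq : List Int) (vals : List (Int × Int)) (n : Nat)
    (h1 : n ≤ freq.length) (h2 : n ≤ vals.length) :
    (PySem.List.pyRange 0 (n : Int)).map
      (fun i => ((PySem.List.pyGetD vals i (0, 0)).1, PySem.List.pyGetD freq i 0))
    = pvPairs (freq.take n) (vals.take n) := by
  induction n with
  | zero => simp [pvPairs]
  | succ n ih =>
      have hc : ((n + 1 : Nat) : Int) = (n : Int) + 1 := by push_cast; ring
      rw [hc, PySem.List.pyRange_one_append 0 (n : Int) ((n : Int) + 1) (by positivity) (by omega)]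
      have hsing : PySem.List.pyRange (n : Int) ((n : Int) + 1) = [(n : Int)] := by
        rw [PySem.List.pyRange_one_cons (by omega), pyRange_self]
      rw [hsing, List.map_append, ih (by omega) (by omega)]
      have hnf : n < freq.length := by omega
      have hnv : n < vals.length := by omega
      have hgf : PySem.List.pyGetD freq (n : Int) 0 = freq[n] := by
        rw [PySem.List.pyGetD_of_nonneg freq 0 (by positivity)]
        simp [List.getD_eq_getElem?_getD, List.getElem?_eq_getElem hnf]
      have hgv : PySem.List.pyGetD vals (n : Int) (0, 0) = vals[n] := by
        rw [PySem.List.pyGetD_of_nonneg vals (0,0) (by positivity)]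
        simp [List.getD_eq_getElem?_getD, List.getElem?_eq_getElem hnv]
      unfold pvPairs
      rw [List.take_add_one, List.take_add_one,
          List.getElem?_eq_getElem hnf, List.getElem?_eq_getElem hnv]
      rw [List.zip_append (by simp [List.length_take]; omega)]
      simp [hgf, hgv]

lemma dict_step_eq (d : PySem.Dict Int Int) (k v : Int) :
    (d.setdefault k 0).insert k ((d.setdefault k 0).getD k 0 + v)
      = d.insert k (d.getD k 0 + v) := by
  cases h : d.contains k with
  | true => rw [PySem.Dict.setdefault_of_contains d 0 h]
  | false =>
      rw [PySem.Dict.setdefault_of_not_contains d 0 h,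
          PySem.Dict.getD_insert_self, PySem.Dict.insert_insert_self,
          PySem.Dict.getD_of_not_contains d 0 h]

lemma getD_foldl_insert_sum (l : List (Int × Int)) (d : PySem.Dict Int Int) (c : Int) :
    (l.foldl (fun d p => d.insert p.1 (d.getD p.1 0 + p.2)) d).getD c 0
      = d.getD c 0 + pvSumK l c := by
  induction l generalizing d with
  | nil => simp [pvSumK]
  | cons p t ih =>
      simp only [List.foldl_cons, ih, pvSumK, List.filter_cons]
      by_cases hc : p.1 = c
      · simp [PySem.Dict.getD_insert, hc]; ring
      · rw [PySem.Dict.getD_insert, if_neg (fun e => hc e.symm)]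
        simp [hc]

lemma foldl_add_cons_notmem (m : List Int) (s : List Int) (x : Int)
    (h : ∀ y ∈ m, y ≠ x) :
    m.foldl PySem.Set.add (x :: s) = x :: m.foldl PySem.Set.add s := by
  induction m generalizing s with
  | nil => rfl
  | cons y t ih =>
      have hyx : y ≠ x := h y (by simp)
      have hstep : PySem.Set.add (x :: s) y = x :: PySem.Set.add s y := by
        simp only [PySem.Set.add, PySem.Set.contains]
        simp [hyx]
        split <;> rfl
      simp only [List.foldl_cons, hstep]
      exact ih _ (fun y hy => h y (by simp [hy]))

lemma foldl_add_skip (m : List Int) (s : List Int) (x : Int) (hx : x ∈ s) :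
    m.foldl PySem.Set.add s = (m.filter (fun y => y != x)).foldl PySem.Set.add s := by
  induction m generalizing s with
  | nil => rfl
  | cons y t ih =>
      by_cases hy : y = x
      · subst hy
        have hskip : PySem.Set.add s y = s := by
          simp [PySem.Set.add, PySem.Set.contains, hx]
        simp [List.filter_cons, hskip, ih s hx]
      · have hxy : x ∈ PySem.Set.add s y := by
          simp [PySem.Set.add]; split <;> simp [hx]
        simp [List.filter_cons, hy, ih _ hxy]

lemma setOfList_cons (x : Int) (l : List Int) :
    PySem.Set.ofList (x :: l) = x :: PySem.Set.ofList (l.filter (fun y => y != x)) := by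
  rw [PySem.Set.ofList_eq_foldl, PySem.Set.ofList_eq_foldl]
  have h1 : List.foldl PySem.Set.add [] (x :: l) = List.foldl PySem.Set.add [x] l := rfl
  rw [h1, foldl_add_skip l [x] x (by simp)]
  exact foldl_add_cons_notmem _ [] x (fun y hy => by
    have := List.of_mem_filter hy; simpa using this)

lemma setOfList_sublist : ∀ (l : List Int), (PySem.Set.ofList l).Sublist l
  | [] => by simp
  | x :: l => by
      rw [setOfList_cons]
      exact List.Sublist.cons₂ x
        ((setOfList_sublist (l.filter (fun y => y != x))).trans List.filter_sublist)
termination_by l => l.length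
decreasing_by simpa using Nat.lt_succ_of_le (List.length_filter_le _ _)

lemma pvSumK_eq_zero (q : List (Int × Int)) (c : Int) (h : ∀ r ∈ q, r.1 ≠ c) :
    pvSumK q c = 0 := by
  have hnil : q.filter (fun p => p.1 == c) = [] := by
    rw [List.filter_eq_nil_iff]; intro a ha; simpa using h a ha
  simp [pvSumK, hnil]

lemma pvSumK_filter_ne (t : List (Int × Int)) (a k : Int) (hk : k ≠ a) :
    pvSumK (t.filter (fun q => q.1 != a)) k = pvSumK t k := by
  unfold pvSumK
  rw [List.filter_filter]
  have h2 : List.filter (fun q => q.1 == k && q.1 != a) t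
      = List.filter (fun p => p.1 == k) t := by
    apply List.filter_congr
    intro q _
    by_cases h : q.1 = k
    · simp [h, hk]
    · simp [h]
  rw [h2]

lemma pvG_cons (p : Int × Int) (t : List (Int × Int)) :
    pvG (p :: t) = (p.2 + pvSumK t p.1) :: pvG (t.filter (fun q => q.1 != p.1)) := by
  unfold pvG
  rw [List.map_cons, setOfList_cons, List.map_cons]
  congr 1
  · simp [pvSumK, List.filter_cons]
  · have hmapf : (t.map (·.1)).filter (fun y => y != p.1)
        = (t.filter (fun q => q.1 != p.1)).map (·.1) := by
      rw [List.filter_map]; rfl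
    rw [hmapf]
    apply List.map_congr_left
    intro k hk
    have hkne : k ≠ p.1 := by
      rcases List.mem_map.1 ((PySem.Set.mem_ofList _ _).1 hk) with ⟨q, hq, rfl⟩
      simpa using (List.of_mem_filter hq)
    rw [pvSumK_filter_ne t p.1 k hkne]
    simp [pvSumK, List.filter_cons, Ne.symm hkne]

lemma scan_go : ∀ (q : List (Int × Int)), q.Pairwise (fun a b => a.1 ≤ b.1) →
    ∀ (out : List Int) (c s : Int), (∀ p ∈ q, c ≤ p.1) →
    pvFinish (q.foldl pvScanStep (out, some c, s))
      = out ++ (s + pvSumK q c) :: pvG (q.filter (fun p => p.1 != c)) := by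
  intro q
  induction q with
  | nil =>
      intro _ out c s _
      simp [pvFinish, pvSumK, pvG]
  | cons p t ih =>
      intro hq out c s hc
      have hpt : ∀ r ∈ t, p.1 ≤ r.1 := (List.pairwise_cons.1 hq).1
      have htq : t.Pairwise (fun a b => a.1 ≤ b.1) := (List.pairwise_cons.1 hq).2
      by_cases h : p.1 = c
      · have hstep : pvScanStep (out, some c, s) p = (out, some c, s + p.2) := by
          simp [pvScanStep, h]
        rw [List.foldl_cons, hstep, ih htq out c (s + p.2) (fun r hr => hc r (by simp [hr]))]
        have hfc : List.filter (fun p => p.1 != c) (p :: t)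
            = List.filter (fun p => p.1 != c) t := by
          simp [List.filter_cons, h]
        have hsum : pvSumK (p :: t) c = p.2 + pvSumK t c := by
          simp [pvSumK, List.filter_cons, h]
        rw [hfc, hsum]
        congr 2
        ring
      · have hstep : pvScanStep (out, some c, s) p = (out ++ [s], some p.1, p.2) := by
          simp [pvScanStep, h]
        rw [List.foldl_cons, hstep, ih htq (out ++ [s]) p.1 p.2 hpt]
        have hne : ∀ r ∈ (p :: t), r.1 ≠ c := by
          intro r hr
          rcases List.mem_cons.1 hr with rfl | hrt
          · exact h
          · have hcp : c < p.1 := lt_of_le_of_ne (hc p (by simp)) (fun e => h e.symm)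
            exact fun e => absurd (e ▸ hpt r hrt) (by omega)
        have h0 : pvSumK (p :: t) c = 0 := pvSumK_eq_zero _ _ hne
        have hfl : List.filter (fun p => p.1 != c) (p :: t) = p :: t := by
          rw [List.filter_eq_self]
          intro a ha; simpa using hne a ha
        rw [h0, hfl, pvG_cons]
        simp

lemma alt_eq_pvG (P : List (Int × Int)) :
    pvFinish ((PySem.List.sorted P (fun p => p.1)).foldl pvScanStep ([], none, 0))
      = pvG (PySem.List.sorted P (fun p => p.1)) := by
  cases hsp : PySem.List.sorted P (fun p => p.1) with
  | nil => simp [pvFinish, pvG]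
  | cons p t =>
      have hpw : (p :: t).Pairwise (fun a b => a.1 ≤ b.1) := by
        rw [← hsp]; exact PySem.List.sorted_pairwise P (fun p => p.1)
      have hstep : pvScanStep ([], none, 0) p = ([], some p.1, p.2) := rfl
      rw [List.foldl_cons, hstep,
          scan_go t (List.pairwise_cons.1 hpw).2 [] p.1 p.2 (List.pairwise_cons.1 hpw).1]
      rw [pvG_cons]
      simp

lemma pvSumK_perm {q q' : List (Int × Int)} (h : q.Perm q') (k : Int) :
    pvSumK q k = pvSumK q' k :=
  ((h.filter _).map _).sum_eq

lemma sorted_keys_eq (P : List (Int × Int)) :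
    PySem.List.sorted (PySem.Set.ofList (P.map (·.1))) (fun k => k)
      = PySem.Set.ofList ((PySem.List.sorted P (fun p => p.1)).map (·.1)) := by
  set sp := PySem.List.sorted P (fun p => p.1) with hsp
  apply PySem.List.sorted_eq_of_perm_of_pairwise_lt
  · rw [List.perm_ext_iff_of_nodup (PySem.Set.nodup_ofList _) (PySem.Set.nodup_ofList _)]
    intro a
    rw [PySem.Set.mem_ofList, PySem.Set.mem_ofList]
    constructor <;> intro h <;> rcases List.mem_map.1 h with ⟨q, hq, rfl⟩
    · exact List.mem_map_of_mem (((PySem.List.sorted_perm P (fun p => p.1) false).mem_iff).1 hq)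
    · exact List.mem_map_of_mem (((PySem.List.sorted_perm P (fun p => p.1) false).mem_iff).2 hq)
  · have hle : (sp.map (·.1)).Pairwise (fun a b => a ≤ b) := by
      rw [List.pairwise_map]
      exact PySem.List.sorted_pairwise P (fun p => p.1)
    have hle' : (PySem.Set.ofList (sp.map (·.1))).Pairwise (fun a b => a ≤ b) :=
      List.Pairwise.sublist (setOfList_sublist _) hle
    have hne : (PySem.Set.ofList (sp.map (·.1))).Pairwise (fun a b => a ≠ b) :=
      PySem.Set.nodup_ofList _
    exact (hle'.and hne).imp (fun h => lt_of_le_of_ne h.1 h.2)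

lemma A_eq (freq : List Int) (vals : List (Int × Int)) (hpre : freq.length ≤ vals.length) :
    get_duplicate_only_distrib freq vals =
      (PySem.List.sorted
        (PySem.Set.ofList ((pvPairs freq (vals.take freq.length)).map (·.1))) (fun k => k)).map
        (pvSumK (pvPairs freq (vals.take freq.length))) := by
  unfold get_duplicate_only_distrib
  have hmap := map_range_pairs freq vals freq.length le_rfl hpre
  rw [List.take_length] at hmap
  have hfold : (PySem.List.pyRange 0 (freq.length : Int)).foldl
      (fun (d : PySem.Dict Int Int) i =>
        let clone_size := (PySem.List.pyGetD vals i (0, 0)).1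
        let d := d.setdefault clone_size 0
        d.insert clone_size (d.getD clone_size 0 + PySem.List.pyGetD freq i 0))
      PySem.Dict.empty
      = (pvPairs freq (vals.take freq.length)).foldl
          (fun d p => d.insert p.1 (d.getD p.1 0 + p.2)) PySem.Dict.empty := by
    rw [← hmap, List.foldl_map]
    exact PySem.List.foldl_congr_mem _ _ _ _ (fun acc x _ => dict_step_eq acc (PySem.List.pyGetD vals x (0, 0)).1 (PySem.List.pyGetD freq x 0))
  rw [hfold]
  show (PySem.List.sorted
        ((List.foldl (fun d p => d.insert p.1 (d.getD p.1 0 + p.2)) PySem.Dict.empty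
          (pvPairs freq (List.take freq.length vals))).keys) (fun k => k)).map
      (fun k => (List.foldl (fun d p => d.insert p.1 (d.getD p.1 0 + p.2)) PySem.Dict.empty
          (pvPairs freq (List.take freq.length vals))).getD k 0) = _
  have hkeys : ((pvPairs freq (vals.take freq.length)).foldl
      (fun d p => d.insert p.1 (d.getD p.1 0 + p.2)) PySem.Dict.empty).keys
      = PySem.Set.ofList ((pvPairs freq (vals.take freq.length)).map (·.1)) := by
    rw [PySem.Dict.keys_foldl_insert_key (l := pvPairs freq (vals.take freq.length))
          (key := fun p => (p : Int × Int).1) (f := fun d p => d.getD p.1 0 + p.2)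
          (d := PySem.Dict.empty)]
    simp [PySem.Dict.keys_empty, PySem.Set.update, PySem.Set.ofList_eq_foldl]
  rw [hkeys]
  apply List.map_congr_left
  intro k _
  rw [getD_foldl_insert_sum, PySem.Dict.getD_empty]
  ring

lemma B_eq (freq : List Int) (vals : List (Int × Int)) (hpre : freq.length ≤ vals.length) :
    get_duplicate_only_distrib_alt freq vals =
      pvG (PySem.List.sorted (pvPairs freq (vals.take freq.length)) (fun p => p.1)) := by
  unfold get_duplicate_only_distrib_alt
  have hmap := map_range_pairs freq vals freq.length le_rfl hpre
  rw [List.take_length] at hmap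
  rw [hmap]
  exact alt_eq_pvG _

-- ===== VERDICT (by name: the statement is the Claim_ definition above) =====
theorem get_duplicate_only_distrib_spec : Claim_equal_get_duplicate_only_distrib := by
  intro freq vals _ hpre
  unfold Spec_get_duplicate_only_distrib
  rw [A_eq freq vals hpre, B_eq freq vals hpre, sorted_keys_eq]
  unfold pvG
  apply List.map_congr_left
  intro k _
  exact pvSumK_perm (PySem.List.sorted_perm _ _ false).symm k
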